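-- pv_equiv track=rewrite | github.com/Bigsby/aoc | 2018/day_11/py/run.py | findLargestPower
-- ===== SOURCE A (Python) =====
-- from typing import Dict, Iterable, Tuple
-- from itertools import product
--
-- Grid = Dict[complex,int]
--
-- GRID_SIZE = 300
--
-- def calculatePowerLevel(x: int, y: int, serialNumber: int) -> int:
--     rackId = x + 10
--     powerLevel = rackId * y
--     powerLevel += serialNumber
--     powerLevel *= rackId
--     powerLevel = powerLevel % 1000 // 100
--     return powerLevel - 5
--
-- def buildGrid(serialNumber: int) -> Dict[complex,int]:
--     return { x + y * 1j: calculatePowerLevel(x + 1, y + 1, serialNumber) for y, x in product(range(GRID_SIZE), range(GRID_SIZE)) }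
--
-- def buildSummedAreaTable(grid: Grid) -> Grid:
--     for y in range(GRID_SIZE):
--         for x in range(GRID_SIZE):
--               grid[x     +  y      * 1j ] = \
--               grid[x     +  y      * 1j ] + \
--             ( grid[x - 1 +  y      * 1j ] if x > 0 else 0 ) + \
--             ( grid[x     + (y - 1) * 1j ] if y > 0 else 0) + \
--             (-grid[x - 1 + (y - 1) * 1j ] if x > 0 and y > 0 else 0)
--     return grid
--
-- def sumFromAreaTable(grid: Grid, x: int, y: int, size: int) -> int:
--     return  grid[x - 1        + (y - 1)        * 1j] \
--           - grid[x - 1 + size + (y - 1)        * 1j] \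
--           - grid[x - 1        + (y - 1 + size) * 1j] \
--           + grid[x - 1 + size + (y - 1 + size) * 1j]
--
-- def findLargestPower(serialNumber: int, sizes: Iterable[int]) -> Tuple[Tuple[int,int], int]:
--     grid = buildGrid(serialNumber)
--     summedAreaTable = buildSummedAreaTable(grid)
--     maxFuel = maxSize = 0
--     maxCell = (-1, -1)
--     for size in sizes:
--         for y, x in product(range(1, GRID_SIZE - size), range(1, GRID_SIZE - size)):
--             fuel = sumFromAreaTable(summedAreaTable, x, y, size)
--             if fuel > maxFuel:
--                 maxFuel = fuel
--                 maxCell = x + 1, y + 1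
--                 maxSize = size
--     return maxCell, maxSize
-- ===== SOURCE B (Python) =====
-- def calculatePowerLevel(x, y, serialNumber):
--     rackId = x + 10
--     powerLevel = rackId * y
--     powerLevel += serialNumber
--     powerLevel *= rackId
--     powerLevel = powerLevel % 1000 // 100
--     return powerLevel - 5
--
--
-- def findLargestPower(serialNumber, sizes):
--     # per-row 1D prefix sums: rowPrefs[j][c] = sum of powers of cells (i, j), i < c (0-based grid coords)
--     rowPrefs = []
--     for y in range(300):
--         acc = 0
--         row = [0]
--         for x in range(300):
--             acc += calculatePowerLevel(x + 1, y + 1, serialNumber)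
--             row.append(acc)
--         rowPrefs.append(row)
--     maxFuel = maxSize = 0
--     maxCell = (-1, -1)
--     for size in sizes:
--         for y in range(1, 300 - size):
--             for x in range(1, 300 - size):
--                 fuel = 0
--                 for j in range(y, y + size):
--                     fuel += rowPrefs[j][x + size] - rowPrefs[j][x]
--                 if fuel > maxFuel:
--                     maxFuel = fuel
--                     maxCell = (x + 1, y + 1)
--                     maxSize = size
--     return maxCell, maxSize
-- ===== Notes on version B (the rewrite author's own statement) =====
-- stated objective: alternative
-- what changed: Replaces the in-place 2D summed-area table and its O(1) four-corner inclusion-exclusion query by per-row 1D prefix sums with an O(size) strip sum per candidate block; loop ranges, strict-greater update and result shape are kept.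
import Mathlib
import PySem

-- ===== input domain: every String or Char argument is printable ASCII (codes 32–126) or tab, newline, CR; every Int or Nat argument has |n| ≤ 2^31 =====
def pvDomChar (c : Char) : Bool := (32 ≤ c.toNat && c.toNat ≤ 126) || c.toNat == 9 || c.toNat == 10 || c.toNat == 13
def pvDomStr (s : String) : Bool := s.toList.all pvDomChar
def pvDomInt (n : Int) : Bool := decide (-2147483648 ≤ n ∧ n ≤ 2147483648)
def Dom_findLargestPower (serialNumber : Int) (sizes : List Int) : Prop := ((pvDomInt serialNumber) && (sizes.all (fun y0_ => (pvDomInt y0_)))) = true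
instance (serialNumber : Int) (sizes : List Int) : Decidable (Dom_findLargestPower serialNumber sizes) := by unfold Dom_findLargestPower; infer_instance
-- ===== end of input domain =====

-- B replaces A's in-place 2D summed-area table and O(1) four-corner queries by per-row 1D prefix
-- sums with an O(size) per-block strip sum (objective: alternative algorithm, similar cost).

-- ===== PORT A =====
-- Python's dict {x + y*1j: …} has exactly the keys x + y*1j, x,y ∈ [0,300); it is represented as a
-- flat array with key x + y*1j at index y*300 + x (the dict-comprehension insertion order).
def calculatePowerLevel (x y serialNumber : Int) : Int :=
  let rackId := x + 10
  let powerLevel := rackId * y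
  let powerLevel := powerLevel + serialNumber
  let powerLevel := powerLevel * rackId
  let powerLevel := PySem.Int.floordiv (PySem.Int.mod powerLevel 1000) 100
  powerLevel - 5

def gridIdx (x y : Int) : Nat := (y * 300 + x).toNat

def buildGrid (serialNumber : Int) : Array Int :=
  (PySem.List.pyRange 0 300 1).foldl (fun g y =>
    (PySem.List.pyRange 0 300 1).foldl (fun g x =>
      g.push (calculatePowerLevel (x + 1) (y + 1) serialNumber)) g) #[]

def buildSummedAreaTable (grid : Array Int) : Array Int :=
  (PySem.List.pyRange 0 300 1).foldl (fun g y =>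
    (PySem.List.pyRange 0 300 1).foldl (fun g x =>
      g.setIfInBounds (gridIdx x y) (g.getD (gridIdx x y) 0
        + (if 0 < x then g.getD (gridIdx (x - 1) y) 0 else 0)
        + (if 0 < y then g.getD (gridIdx x (y - 1)) 0 else 0)
        + (if 0 < x ∧ 0 < y then -(g.getD (gridIdx (x - 1) (y - 1)) 0) else 0))) g) grid

def sumFromAreaTable (g : Array Int) (x y size : Int) : Int :=
  g.getD (gridIdx (x - 1) (y - 1)) 0
  - g.getD (gridIdx (x - 1 + size) (y - 1)) 0
  - g.getD (gridIdx (x - 1) (y - 1 + size)) 0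
  + g.getD (gridIdx (x - 1 + size) (y - 1 + size)) 0

def findLargestPower (serialNumber : Int) (sizes : List Int) : (Int × Int) × Int :=
  let grid := buildGrid serialNumber
  let summedAreaTable := buildSummedAreaTable grid
  let st := sizes.foldl (fun (st : Int × (Int × Int) × Int) size =>
      (PySem.List.pyRange 1 (300 - size) 1).foldl (fun st y =>
        (PySem.List.pyRange 1 (300 - size) 1).foldl (fun st x =>
          let fuel := sumFromAreaTable summedAreaTable x y size
          if fuel > st.1 then (fuel, (x + 1, y + 1), size) else st) st) st)
    (0, ((-1 : Int), (-1 : Int)), 0)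
  (st.2.1, st.2.2)

-- ===== PORT B =====
-- Source B's calculatePowerLevel is character-for-character the same function as A's helper above,
-- so its port is shared rather than duplicated.

-- rowPrefs[y] = [0, g(0,y), g(0,y)+g(1,y), …] — the list-of-lists of Source B as array-of-arrays
def buildRowPrefs (serialNumber : Int) : Array (Array Int) :=
  (PySem.List.pyRange 0 300 1).foldl (fun rows y =>
    let p := (PySem.List.pyRange 0 300 1).foldl
      (fun (p : Int × Array Int) x =>
        let acc := p.1 + calculatePowerLevel (x + 1) (y + 1) serialNumber
        (acc, p.2.push acc))
      ((0 : Int), #[(0 : Int)])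
    rows.push p.2) #[]

def findLargestPower_alt (serialNumber : Int) (sizes : List Int) : (Int × Int) × Int :=
  let rowPrefs := buildRowPrefs serialNumber
  let st := sizes.foldl (fun (st : Int × (Int × Int) × Int) size =>
      (PySem.List.pyRange 1 (300 - size) 1).foldl (fun st y =>
        (PySem.List.pyRange 1 (300 - size) 1).foldl (fun st x =>
          let fuel := (PySem.List.pyRange y (y + size) 1).foldl
            (fun fuel j =>
              fuel + ((rowPrefs.getD j.toNat #[]).getD (x + size).toNat 0
                    - (rowPrefs.getD j.toNat #[]).getD x.toNat 0)) 0
          if fuel > st.1 then (fuel, (x + 1, y + 1), size) else st) st) st)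
    (0, ((-1 : Int), (-1 : Int)), 0)
  (st.2.1, st.2.2)

-- ===== PRECONDITION & SPEC =====
-- Pre_ excludes exactly the inputs on which A raises: any negative size makes the first
-- sumFromAreaTable lookup use a key with negative real part, which is a KeyError in Python.
def Pre_findLargestPower (serialNumber : Int) (sizes : List Int) : Prop :=
  ∀ z ∈ sizes, 0 ≤ z
instance (serialNumber : Int) (sizes : List Int) : Decidable (Pre_findLargestPower serialNumber sizes) := by
  unfold Pre_findLargestPower; infer_instance

def pvWitness_findLargestPower : Int × List Int := (18, [3])

def Spec_findLargestPower (serialNumber : Int) (sizes : List Int) (out : (Int × Int) × Int) : Prop := out = findLargestPower_alt serialNumber sizes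
instance (serialNumber : Int) (sizes : List Int) (out : (Int × Int) × Int) : Decidable (Spec_findLargestPower serialNumber sizes out) := by unfold Spec_findLargestPower; infer_instance

-- ===== CLAIM (what is proved, stated in full; the proofs are below) =====
def Claim_equal_findLargestPower : Prop := ∀ (serialNumber : Int) (sizes : List Int), Dom_findLargestPower serialNumber sizes → Pre_findLargestPower serialNumber sizes → Spec_findLargestPower serialNumber sizes (findLargestPower serialNumber sizes)

-- ===== LEMMAS AND PROOFS =====

-- Gv s x y: power level of 0-based grid cell (x, y); RowS s j a: sum of cells (i, j), i < a;
-- SAT2 s a b: sum of cells (i, j), i < a, j < b (the summed-area-table entry at (a-1, b-1)).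
def Gv (s : Int) (x y : Nat) : Int := calculatePowerLevel ((x : Int) + 1) ((y : Int) + 1) s
def RowS (s : Int) (j a : Nat) : Int := ∑ i ∈ Finset.range a, Gv s i j
def SAT2 (s : Int) (a b : Nat) : Int := ∑ j ∈ Finset.range b, RowS s j a

def gridVals (s : Int) : List Int := (List.range 90000).map (fun k => Gv s (k % 300) (k / 300))
def satVals (s : Int) : List Int := (List.range 90000).map (fun k => SAT2 s (k % 300 + 1) (k / 300 + 1))
def rowList (s : Int) (y : Nat) : List Int := (List.range 301).map (fun c => RowS s y c)

lemma rowS_succ (s : Int) (j a : Nat) : RowS s j (a + 1) = RowS s j a + Gv s a j := by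
  simp [RowS, Finset.sum_range_succ]

lemma sat2_zero_left (s : Int) (b : Nat) : SAT2 s 0 b = 0 := by simp [SAT2, RowS]

lemma sat2_zero_right (s : Int) (a : Nat) : SAT2 s a 0 = 0 := by simp [SAT2]

lemma sat2_succ_left (s : Int) (a b : Nat) :
    SAT2 s (a + 1) b = SAT2 s a b + ∑ j ∈ Finset.range b, Gv s a j := by
  simp [SAT2, rowS_succ, Finset.sum_add_distrib]

lemma sat2_rec (s : Int) (x y : Nat) :
    SAT2 s (x + 1) (y + 1) = Gv s x y + SAT2 s x (y + 1) + SAT2 s (x + 1) y - SAT2 s x y := by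
  rw [sat2_succ_left, sat2_succ_left, Finset.sum_range_succ]; ring

lemma sat2_strip (s : Int) (a q m : Nat) :
    SAT2 s a (q + m) = SAT2 s a q + ∑ k ∈ Finset.range m, RowS s (q + k) a := by
  induction m with
  | zero => simp
  | succ m ih =>
      rw [← Nat.add_assoc, SAT2, Finset.sum_range_succ, ← SAT2, ih, Finset.sum_range_succ]; ring

lemma foldl_range_inv {α : Type} (Inv : Nat → α → Prop) (step : α → Nat → α) :
    ∀ (n : Nat) (a : α), (∀ k b, k < n → Inv k b → Inv (k + 1) (step b k)) → Inv 0 a →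
      Inv n ((List.range n).foldl step a) := by
  intro n
  induction n with
  | zero => intro a _ h0; simpa using h0
  | succ n ih =>
      intro a h h0
      rw [List.range_succ, List.foldl_append]
      exact h n _ (Nat.lt_succ_self n) (ih a (fun k b hk => h k b (Nat.lt_succ_of_lt hk)) h0)

lemma flatMap_range_map {α : Type} (n m : Nat) (F : Nat → Nat → α) :
    (List.range n).flatMap (fun y => (List.range m).map (fun x => F x y))
      = (List.range (n * m)).map (fun k => F (k % m) (k / m)) := by
  induction n with
  | zero => simp
  | succ n ih =>
      rw [List.range_succ, List.flatMap_append, ih, Nat.succ_mul, List.range_add, List.map_append]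
      congr 1
      simp only [List.flatMap_singleton, List.map_map]
      apply List.map_congr_left
      intro x hx
      have hxm : x < m := List.mem_range.mp hx
      have h1 : (n * m + x) % m = x := by
        rw [Nat.add_comm, Nat.add_mul_mod_self_right, Nat.mod_eq_of_lt hxm]
      have h2 : (n * m + x) / m = n := by
        rw [Nat.add_comm, Nat.add_mul_div_right _ _ (by omega : 0 < m), Nat.div_eq_of_lt hxm]; omega
      simp [h1, h2]

lemma foldl_nested_range {α : Type} (n m : Nat) (step : α → Nat → Nat → α) (init : α) :
    (List.range n).foldl (fun a y => (List.range m).foldl (fun a x => step a y x) a) init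
      = (List.range (n * m)).foldl (fun a k => step a (k / m) (k % m)) init := by
  have h := (List.foldl_flatMap (l := List.range n)
    (f := fun y => (List.range m).map (fun x => ((y, x) : Nat × Nat)))
    (g := fun (a : α) (p : Nat × Nat) => step a p.1 p.2) (init := init))
  rw [flatMap_range_map n m (fun x y => ((y, x) : Nat × Nat))] at h
  simpa [List.foldl_map] using h.symm

lemma foldl_append_toArray {α : Type} (l : List Nat) (f : Nat → List α) (a : Array α) :
    l.foldl (fun a y => a ++ (f y).toArray) a = a ++ (l.flatMap f).toArray := by
  induction l generalizing a with
  | nil => simp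
  | cons x xs ih => simp [ih, List.append_toArray]

set_option maxRecDepth 4096 in
lemma foldl_pyRange300 {α : Type} (f : α → Int → α) (init : α) :
    (PySem.List.pyRange 0 300 1).foldl f init = (List.range 300).foldl (fun a (k : Nat) => f a (k : Int)) init := by
  have h := PySem.List.pyRange_zero_natCast 300
  have h2 : ((300 : Nat) : Int) = (300 : Int) := by decide
  rw [h2] at h
  rw [h, List.foldl_map]

lemma buildGrid_eq (s : Int) : buildGrid s = (gridVals s).toArray := by
  unfold buildGrid
  simp only [foldl_pyRange300]
  have inner : ∀ (y : Nat) (g : Array Int),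
      (List.range 300).foldl (fun g x => g.push (calculatePowerLevel ((x : Int) + 1) ((y : Int) + 1) s)) g
        = g ++ ((List.range 300).map (fun x => Gv s x y)).toArray := by
    intro y g
    show (List.range 300).foldl (fun g x => g.push (Gv s x y)) g = _
    rw [← List.foldl_map (f := fun x : Nat => Gv s x y) (g := fun (a : Array Int) v => a.push v)]
    exact List.foldl_push_eq_append'
  simp only [inner]
  rw [foldl_append_toArray, flatMap_range_map]
  norm_num [gridVals]

set_option maxRecDepth 8192 in
lemma buildSAT_eq (s : Int) :
    buildSummedAreaTable (buildGrid s) = (satVals s).toArray := by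
  unfold buildSummedAreaTable
  simp only [foldl_pyRange300]
  rw [foldl_nested_range]
  have h90000 : (300 : Nat) * 300 = 90000 := by norm_num
  rw [h90000]
  have main := foldl_range_inv
    (Inv := fun c (g : Array Int) => g.size = 90000 ∧ ∀ j (hj : j < g.size),
      g[j] = if j < c then SAT2 s (j % 300 + 1) (j / 300 + 1) else Gv s (j % 300) (j / 300))
    (step := fun (g : Array Int) k =>
      g.setIfInBounds (gridIdx ((k % 300 : Nat) : Int) ((k / 300 : Nat) : Int))
        (g.getD (gridIdx ((k % 300 : Nat) : Int) ((k / 300 : Nat) : Int)) 0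
        + (if 0 < ((k % 300 : Nat) : Int) then g.getD (gridIdx (((k % 300 : Nat) : Int) - 1) ((k / 300 : Nat) : Int)) 0 else 0)
        + (if 0 < ((k / 300 : Nat) : Int) then g.getD (gridIdx ((k % 300 : Nat) : Int) (((k / 300 : Nat) : Int) - 1)) 0 else 0)
        + (if 0 < ((k % 300 : Nat) : Int) ∧ 0 < ((k / 300 : Nat) : Int) then -(g.getD (gridIdx (((k % 300 : Nat) : Int) - 1) (((k / 300 : Nat) : Int) - 1)) 0) else 0)))
    90000 (buildGrid s) ?_ ?_
  · obtain ⟨hsz, hget⟩ := main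
    apply Array.ext
    · rw [hsz]; simp [satVals]
    · intro i h1 h2
      have hi : i < 90000 := by omega
      rw [hget i h1]
      simp only [satVals, List.getElem_toArray, List.getElem_map, List.getElem_range, if_pos hi]
  · -- step
    rintro k g hk ⟨hsz, hget⟩
    beta_reduce
    have hx : k % 300 < 300 := Nat.mod_lt _ (by norm_num)
    have hy : k / 300 < 300 := by omega
    have hk' : k = (k / 300) * 300 + k % 300 := by omega
    have hidx : gridIdx ((k % 300 : Nat) : Int) ((k / 300 : Nat) : Int) = k := by
      unfold gridIdx; omega
    have hgetD : ∀ (i : Nat) (hi : i < g.size), g.getD i 0 = g[i] := by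
      intro i hi; exact (Array.getElem_eq_getD 0).symm
    constructor
    · simp [Array.size_setIfInBounds, hsz]
    · intro j hj
      rw [Array.size_setIfInBounds] at hj
      by_cases hjk : j = k
      · subst hjk
        simp only [hidx]
        rw [Array.getElem_setIfInBounds_self (by rw [Array.size_setIfInBounds]; omega)]
        rw [if_pos (by omega : j < j + 1)]
        -- value computation
        set x := j % 300 with hxdef
        set y := j / 300 with hydef
        have hj90 : j < 90000 := hk
        have e0 : g.getD j 0 = Gv s x y := by
          rw [hgetD j (by omega)]
          rw [hget j (by omega), if_neg (by omega)]
        have e1 : (if 0 < ((x : Nat) : Int) then g.getD (gridIdx (((x : Nat) : Int) - 1) ((y : Nat) : Int)) 0 else 0) = SAT2 s x (y + 1) := by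
          by_cases hx0 : 0 < x
          · rw [if_pos (by exact_mod_cast hx0)]
            have hi1 : gridIdx (((x : Nat) : Int) - 1) ((y : Nat) : Int) = j - 1 := by
              unfold gridIdx; omega
            rw [hi1, hgetD (j - 1) (by omega), hget (j - 1) (by omega), if_pos (by omega)]
            have d1 : (j - 1) % 300 = x - 1 := by omega
            have d2 : (j - 1) / 300 = y := by omega
            rw [d1, d2]
            congr 1
            omega
          · rw [if_neg (by exact_mod_cast hx0)]
            have : x = 0 := by omega
            rw [this, sat2_zero_left]
        have e2 : (if 0 < ((y : Nat) : Int) then g.getD (gridIdx ((x : Nat) : Int) (((y : Nat) : Int) - 1)) 0 else 0) = SAT2 s (x + 1) y := by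
          by_cases hy0 : 0 < y
          · rw [if_pos (by exact_mod_cast hy0)]
            have hi1 : gridIdx ((x : Nat) : Int) (((y : Nat) : Int) - 1) = j - 300 := by
              unfold gridIdx; omega
            rw [hi1, hgetD (j - 300) (by omega), hget (j - 300) (by omega), if_pos (by omega)]
            have d1 : (j - 300) % 300 = x := by omega
            have d2 : (j - 300) / 300 = y - 1 := by omega
            rw [d1, d2]
            congr 1
            omega
          · rw [if_neg (by exact_mod_cast hy0)]
            have : y = 0 := by omega
            rw [this, sat2_zero_right]
        have e3 : (if 0 < ((x : Nat) : Int) ∧ 0 < ((y : Nat) : Int) then -(g.getD (gridIdx (((x : Nat) : Int) - 1) (((y : Nat) : Int) - 1)) 0) else 0) = -SAT2 s x y := by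
          by_cases hxy0 : 0 < x ∧ 0 < y
          · rw [if_pos (by exact_mod_cast hxy0)]
            have hi1 : gridIdx (((x : Nat) : Int) - 1) (((y : Nat) : Int) - 1) = j - 301 := by
              unfold gridIdx; omega
            rw [hi1, hgetD (j - 301) (by omega), hget (j - 301) (by omega), if_pos (by omega)]
            have d1 : (j - 301) % 300 = x - 1 := by omega
            have d2 : (j - 301) / 300 = y - 1 := by omega
            rw [d1, d2]
            have : (x - 1 + 1) = x := by omega
            have h2 : (y - 1 + 1) = y := by omega
            rw [this, h2]
          · rw [if_neg (by exact_mod_cast hxy0)]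
            rcases Nat.eq_zero_or_pos x with h | h
            · rw [h, sat2_zero_left]; ring
            · have : y = 0 := by omega
              rw [this, sat2_zero_right]; ring
        rw [e0, e1, e2, e3, sat2_rec]
        ring
      · simp only [hidx]
        rw [Array.getElem_setIfInBounds_ne (by omega) (fun h => hjk h.symm)]
        rw [hget j (by omega)]
        by_cases hjc : j < k
        · rw [if_pos hjc, if_pos (by omega)]
        · rw [if_neg hjc, if_neg (by omega)]
  · -- base
    rw [buildGrid_eq]
    constructor
    · simp [gridVals]
    · intro j hj
      have hj' : j < 90000 := by simpa [gridVals] using hj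
      simp only [gridVals, List.getElem_toArray, List.getElem_map, List.getElem_range]
      rw [if_neg (by omega)]

lemma buildRowPrefs_eq (s : Int) :
    buildRowPrefs s = ((List.range 300).map (fun y => (rowList s y).toArray)).toArray := by
  unfold buildRowPrefs
  simp only [foldl_pyRange300]
  have hinner : ∀ y : Nat,
      (List.range 300).foldl
        (fun (p : Int × Array Int) (x : Nat) =>
          ((p.1 + calculatePowerLevel ((x : Int) + 1) ((y : Int) + 1) s),
            p.2.push (p.1 + calculatePowerLevel ((x : Int) + 1) ((y : Int) + 1) s)))
        ((0 : Int), #[(0 : Int)])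
      = (RowS s y 300, (rowList s y).toArray) := by
    intro y
    have main := foldl_range_inv
      (Inv := fun c (p : Int × Array Int) =>
        p.1 = RowS s y c ∧ p.2 = ((List.range (c + 1)).map (fun t => RowS s y t)).toArray)
      (step := fun (p : Int × Array Int) (x : Nat) =>
        ((p.1 + calculatePowerLevel ((x : Int) + 1) ((y : Int) + 1) s),
          p.2.push (p.1 + calculatePowerLevel ((x : Int) + 1) ((y : Int) + 1) s)))
      300 ((0 : Int), #[(0 : Int)]) ?_ ?_
    · obtain ⟨h1, h2⟩ := main
      refine Prod.ext h1 ?_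
      rw [h2]
      simp only [rowList]
    · rintro k p hk ⟨h1, h2⟩
      beta_reduce
      have hstep : p.1 + calculatePowerLevel ((k : Int) + 1) ((y : Int) + 1) s = RowS s y (k + 1) := by
        rw [h1, rowS_succ]; rfl
      refine ⟨hstep, ?_⟩
      rw [h2, hstep, List.push_toArray]
      simp [List.range_succ]
    · exact ⟨by unfold RowS; simp, by unfold RowS; simp⟩
  simp only [hinner]
  show (List.range 300).foldl (fun rows y => rows.push ((rowList s y).toArray)) #[] = _
  rw [← List.foldl_map (f := fun y : Nat => (rowList s y).toArray)
    (g := fun (a : Array (Array Int)) v => a.push v)]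
  rw [List.foldl_push_eq_append']
  simp

lemma fuel_eq (s size x y : Int) (hs : 0 ≤ size) (hx1 : 1 ≤ x) (hy1 : 1 ≤ y)
    (hx2 : x < 300 - size) (hy2 : y < 300 - size) :
    sumFromAreaTable (buildSummedAreaTable (buildGrid s)) x y size
      = (PySem.List.pyRange y (y + size) 1).foldl
          (fun fuel j =>
            fuel + (((buildRowPrefs s).getD j.toNat #[]).getD (x + size).toNat 0
                  - ((buildRowPrefs s).getD j.toNat #[]).getD x.toNat 0)) 0 := by
  obtain ⟨m, rfl⟩ : ∃ m : Nat, size = (m : Int) := ⟨size.toNat, (Int.toNat_of_nonneg hs).symm⟩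
  obtain ⟨p, rfl⟩ : ∃ p : Nat, x = (p : Int) := ⟨x.toNat, (Int.toNat_of_nonneg (by omega)).symm⟩
  obtain ⟨q, rfl⟩ : ∃ q : Nat, y = (q : Int) := ⟨y.toNat, (Int.toNat_of_nonneg (by omega)).symm⟩
  have hp1 : 1 ≤ p := by exact_mod_cast hx1
  have hq1 : 1 ≤ q := by exact_mod_cast hy1
  have hpm : p + m < 300 := by exact_mod_cast (by omega : ((p : Int) + m) < 300)
  have hqm : q + m < 300 := by exact_mod_cast (by omega : ((q : Int) + m) < 300)
  have satAt : ∀ u v : Nat, u < 300 → v < 300 →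
      ((satVals s).toArray).getD (v * 300 + u) 0 = SAT2 s (u + 1) (v + 1) := by
    intro u v hu hv
    have hlt : v * 300 + u < (satVals s).toArray.size := by
      simp only [List.size_toArray, satVals, List.length_map, List.length_range]; omega
    rw [← Array.getElem_eq_getD (h := hlt)]
    have d1 : (v * 300 + u) % 300 = u := by omega
    have d2 : (v * 300 + u) / 300 = v := by omega
    simp only [satVals, List.getElem_toArray, List.getElem_map, List.getElem_range, d1, d2]
  have rowsAt : ∀ j : Nat, j < 300 →
      ((((List.range 300).map (fun y => (rowList s y).toArray)).toArray).getD j #[]) = (rowList s j).toArray := by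
    intro j hj
    have hlt : j < (((List.range 300).map (fun y => (rowList s y).toArray)).toArray).size := by
      simp only [List.size_toArray, List.length_map, List.length_range]; omega
    rw [← Array.getElem_eq_getD (h := hlt)]
    simp only [List.getElem_toArray, List.getElem_map, List.getElem_range]
  have rowListAt : ∀ j c : Nat, c < 301 → ((rowList s j).toArray).getD c 0 = RowS s j c := by
    intro j c hc
    have hlt : c < ((rowList s j).toArray).size := by
      simp only [List.size_toArray, rowList, List.length_map, List.length_range]; omega
    rw [← Array.getElem_eq_getD (h := hlt)]
    simp only [rowList, List.getElem_toArray, List.getElem_map, List.getElem_range]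
  -- left side
  rw [buildSAT_eq]
  unfold sumFromAreaTable
  have i1 : gridIdx ((p : Int) - 1) ((q : Int) - 1) = (q - 1) * 300 + (p - 1) := by
    unfold gridIdx; omega
  have i2 : gridIdx ((p : Int) - 1 + (m : Int)) ((q : Int) - 1) = (q - 1) * 300 + (p - 1 + m) := by
    unfold gridIdx; omega
  have i3 : gridIdx ((p : Int) - 1) ((q : Int) - 1 + (m : Int)) = (q - 1 + m) * 300 + (p - 1) := by
    unfold gridIdx; omega
  have i4 : gridIdx ((p : Int) - 1 + (m : Int)) ((q : Int) - 1 + (m : Int)) = (q - 1 + m) * 300 + (p - 1 + m) := by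
    unfold gridIdx; omega
  rw [i1, i2, i3, i4,
    satAt _ _ (by omega) (by omega), satAt _ _ (by omega) (by omega),
    satAt _ _ (by omega) (by omega), satAt _ _ (by omega) (by omega)]
  have c1 : p - 1 + 1 = p := by omega
  have c2 : q - 1 + 1 = q := by omega
  have c3 : p - 1 + m + 1 = p + m := by omega
  have c4 : q - 1 + m + 1 = q + m := by omega
  rw [c1, c2, c3, c4]
  -- right side
  rw [buildRowPrefs_eq, PySem.List.pyRange_one]
  have hm : ((q : Int) + (m : Int) - (q : Int)).toNat = m := by omega
  rw [hm, List.foldl_map]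
  rw [PySem.List.foldl_congr_mem _ _
    (fun (fuel : Int) (k : Nat) => fuel + (RowS s (q + k) (p + m) - RowS s (q + k) p)) 0 ?_]
  · rw [PySem.List.foldl_add]
    have hbr : ((List.range m).map (fun k => RowS s (q + k) (p + m) - RowS s (q + k) p)).sum
        = ∑ k ∈ Finset.range m, (RowS s (q + k) (p + m) - RowS s (q + k) p) := rfl
    rw [hbr, Finset.sum_sub_distrib]
    rw [sat2_strip s p q m, sat2_strip s (p + m) q m]
    ring
  · intro acc k hk
    have hkm : k < m := List.mem_range.mp hk
    have t1 : ((q : Int) + (k : Int)).toNat = q + k := by omega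
    have t2 : ((p : Int) + (m : Int)).toNat = p + m := by omega
    have t3 : ((p : Int)).toNat = p := by omega
    rw [t1, t2, t3, rowsAt _ (by omega), rowListAt _ _ (by omega), rowListAt _ _ (by omega)]

-- ===== VERDICT (by name: the statement is the Claim_ definition above) =====
theorem findLargestPower_spec : Claim_equal_findLargestPower := by
  intro s sizes _hdom hpre
  unfold Spec_findLargestPower findLargestPower findLargestPower_alt
  refine congrArg (fun st : Int × (Int × Int) × Int => (st.2.1, st.2.2)) ?_
  apply PySem.List.foldl_congr_mem
  intro st size hsz
  have hs : 0 ≤ size := hpre size hsz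
  apply PySem.List.foldl_congr_mem
  intro st1 y hy
  obtain ⟨hy1, hy2⟩ := PySem.List.mem_pyRange_one.mp hy
  apply PySem.List.foldl_congr_mem
  intro st2 x hx
  obtain ⟨hx1, hx2⟩ := PySem.List.mem_pyRange_one.mp hx
  rw [fuel_eq s size x y hs hx1 hy1 hx2 hy2]
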